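-- pv_equiv track=rewrite | github.com/theabbie/leetcode | minimum-operations-to-make-the-array-k-increasing.py | kIncreasing
-- ===== SOURCE A (Python) =====
-- from typing import List
--
-- import bisect
--
-- def kIncreasing(arr: List[int], k: int) -> int:
--     n = len(arr)
--     lis = [[] for _ in range(k)]
--     res = n
--     for i in range(n):
--         x = bisect.bisect_left(lis[i % k], (arr[i], i))
--         if x < len(lis[i % k]):
--             lis[i % k][x] = (arr[i], i)
--         else:
--             lis[i % k].append((arr[i], i))
--             res -= 1
--     return res
-- ===== SOURCE B (Python) =====
-- from typing import List
--
-- def kIncreasing(arr: List[int], k: int) -> int: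
--     # Partition arr into k residue groups, then per group compute the length of the
--     # longest non-decreasing subsequence with a quadratic DP; answer is n - sum of lengths.
--     groups = [[] for _ in range(k)]
--     for i, x in enumerate(arr):
--         groups[i % k].append(x)
--     total = 0
--     for g in groups:
--         dps = []  # (value, length of longest non-decreasing subsequence ending at it)
--         for v in g:
--             best = 0
--             for (y, d) in dps:
--                 if y <= v and d > best:
--                     best = d
--             dps.append((v, best + 1))
--         best_len = 0
--         for (_, d) in dps:
--             if d > best_len:
--                 best_len = d
--         total += best_len
--     return len(arr) - total
-- ===== Notes on version B (the rewrite author's own statement) =====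
-- stated objective: alternative
-- what changed: Replaces the interleaved patience-sorting loop (binary search on (value,index) tuples maintained per residue class) by an explicit partition into k residue groups followed by a quadratic longest-non-decreasing-subsequence DP per group; Pre_ only excludes inputs where A raises (k <= 0 with a nonempty arr: ZeroDivisionError/IndexError).
import Mathlib
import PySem

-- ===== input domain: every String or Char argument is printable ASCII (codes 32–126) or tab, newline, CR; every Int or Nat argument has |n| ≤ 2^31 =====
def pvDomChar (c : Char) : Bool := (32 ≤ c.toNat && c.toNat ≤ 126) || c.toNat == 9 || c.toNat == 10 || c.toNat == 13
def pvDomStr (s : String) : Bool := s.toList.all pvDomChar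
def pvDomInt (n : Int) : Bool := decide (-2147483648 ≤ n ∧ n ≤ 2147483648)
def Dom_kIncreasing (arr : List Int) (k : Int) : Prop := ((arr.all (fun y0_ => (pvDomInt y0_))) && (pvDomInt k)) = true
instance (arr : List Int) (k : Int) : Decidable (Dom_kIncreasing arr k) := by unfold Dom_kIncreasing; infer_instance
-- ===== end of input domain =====

-- B replaces A's interleaved patience-sorting loop (binary search on (value,index) tuples
-- kept per residue class) by an explicit partition into the k residue groups followed by a
-- quadratic longest-non-decreasing-subsequence DP per group (objective: alternative algorithm).

-- ===== PORT A =====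
-- Python compares tuples lexicographically; PySem.List.bisectLeft uses the type's `<`,
-- which on `Int × Int` is the pointwise product order, not Python's tuple order — so
-- bisect.bisect_left on tuples is ported by hand, step for step (exact: CPython's loop
-- `while lo < hi: mid = (lo+hi)//2; if a[mid] < x: lo = mid+1 else: hi = mid`).
def pvPairLt (a b : Int × Int) : Bool := a.1 < b.1 || (a.1 == b.1 && a.2 < b.2)

def pvBisectAux (l : List (Int × Int)) (key : Int × Int) (lo hi : Nat) : Nat :=
  if _h : lo < hi then
    if pvPairLt (l.getD ((lo + hi) / 2) (0, 0)) key then pvBisectAux l key ((lo + hi) / 2 + 1) hi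
    else pvBisectAux l key lo ((lo + hi) / 2)
  else lo
termination_by hi - lo
decreasing_by all_goals omega

def pvBisectLeft (l : List (Int × Int)) (key : Int × Int) : Nat := pvBisectAux l key 0 l.length

def pvStepA (k : Int) (arr : List Int) (st : List (List (Int × Int)) × Int) (i : Int) :
    List (List (Int × Int)) × Int :=
  let g := PySem.Int.mod i k
  let tail := (PySem.List.pyGet? st.1 g).getD []
  let ai := (PySem.List.pyGet? arr i).getD 0
  let x := pvBisectLeft tail (ai, i)
  if x < tail.length then (st.1.set g.toNat (tail.set x (ai, i)), st.2)
  else (st.1.set g.toNat (tail ++ [(ai, i)]), st.2 - 1)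

def kIncreasing (arr : List Int) (k : Int) : Int :=
  ((PySem.List.pyRange 0 (arr.length : Int) 1).foldl (pvStepA k arr)
    ((PySem.List.pyRange 0 k 1).map (fun _ => ([] : List (Int × Int))), (arr.length : Int))).2

-- ===== PORT B =====
def pvBestLe (dps : List (Int × Int)) (v : Int) : Int :=
  dps.foldl (fun best yd => if yd.1 ≤ v ∧ yd.2 > best then yd.2 else best) 0

def pvDpGroup (g : List Int) : Int :=
  let dps := g.foldl (fun dps v => dps ++ [(v, pvBestLe dps v + 1)]) ([] : List (Int × Int))
  dps.foldl (fun best yd => if yd.2 > best then yd.2 else best) 0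

def pvStepB (k : Int) (gs : List (List Int)) (ix : Int × Int) : List (List Int) :=
  let g := PySem.Int.mod ix.1 k
  gs.set g.toNat ((PySem.List.pyGet? gs g).getD [] ++ [ix.2])

def kIncreasing_alt (arr : List Int) (k : Int) : Int :=
  (arr.length : Int) -
    ((PySem.List.enumerate arr).foldl (pvStepB k)
      ((PySem.List.pyRange 0 k 1).map (fun _ => ([] : List Int)))).foldl
      (fun acc g => acc + pvDpGroup g) 0

-- ===== PRECONDITION & SPEC =====
-- Pre_ excludes exactly the inputs where A raises (k ≤ 0 with a nonempty arr:
-- ZeroDivisionError for k = 0, IndexError for k < 0); B raises there too.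
def Pre_kIncreasing (arr : List Int) (k : Int) : Prop := 1 ≤ k ∨ arr = []
instance (arr : List Int) (k : Int) : Decidable (Pre_kIncreasing arr k) := by
  unfold Pre_kIncreasing; infer_instance

def pvWitness_kIncreasing : List Int × Int := ([4, 1, 5, 2, 6, 2], 2)

def Spec_kIncreasing (arr : List Int) (k : Int) (out : Int) : Prop := out = kIncreasing_alt arr k
instance (arr : List Int) (k : Int) (out : Int) : Decidable (Spec_kIncreasing arr k out) := by
  unfold Spec_kIncreasing; infer_instance

-- ===== CLAIM (what is proved, stated in full; the proofs are below) =====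
def Claim_equal_kIncreasing : Prop := ∀ (arr : List Int) (k : Int), Dom_kIncreasing arr k →
  Pre_kIncreasing arr k → Spec_kIncreasing arr k (kIncreasing arr k)

-- ===== LEMMAS AND PROOFS =====

-- Lexicographic (Python tuple) order on pairs, as a Prop.
def lexLt (a b : Int × Int) : Prop := a.1 < b.1 ∨ (a.1 = b.1 ∧ a.2 < b.2)

lemma pvPairLt_iff (a b : Int × Int) : pvPairLt a b = true ↔ lexLt a b := by
  simp [pvPairLt, lexLt]

lemma lexLt_trans {a b c : Int × Int} (h1 : lexLt a b) (h2 : lexLt b c) : lexLt a c := by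
  rcases h1 with h1 | ⟨h1, h1'⟩ <;> rcases h2 with h2 | ⟨h2, h2'⟩ <;>
    simp only [lexLt] <;> omega

-- One patience step on one residue class (what A's loop body does to group i % k).
def patStep (T : List (Int × Int)) (p : Int × Int) : List (Int × Int) :=
  if pvBisectLeft T p < T.length then T.set (pvBisectLeft T p) p else T ++ [p]

-- The DP step and DP maximum of B, as named functions.
def dstep (D : List (Int × Int)) (v : Int) : List (Int × Int) := D ++ [(v, pvBestLe D v + 1)]
def maxd (D : List (Int × Int)) : Int := D.foldl (fun best yd => if yd.2 > best then yd.2 else best) 0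

lemma pvDpGroup_eq (g : List Int) : pvDpGroup g = maxd (g.foldl dstep []) := rfl

-- Dispatch-fold: fold that sends element (i, b) to slot i % K.
def dfold {σ β : Type} (dflt : σ) (f : σ → β → σ) (K : Nat) (st : List σ) (E : List (Nat × β)) :
    List σ :=
  E.foldl (fun s ib => s.set (ib.1 % K) (f (s.getD (ib.1 % K) dflt) ib.2)) st

def sumL (l : List (List (Int × Int))) : Int := (l.map (fun t => (t.length : Int))).sum

-- ---- binary search correctness ----
lemma pvBisectAux_eq (l : List (Int × Int)) (key : Int × Int) (b : Nat)
    (hins : ∀ j, j < b → pvPairLt (l.getD j (0, 0)) key = true)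
    (hout : ∀ j, b ≤ j → j < l.length → pvPairLt (l.getD j (0, 0)) key = false) :
    ∀ n lo hi, hi - lo = n → lo ≤ b → b ≤ hi → hi ≤ l.length → pvBisectAux l key lo hi = b := by
  intro n
  induction n using Nat.strong_induction_on with
  | _ n ih =>
    intro lo hi hn hlob hbhi hhil
    rw [pvBisectAux]
    by_cases h : lo < hi
    · rw [dif_pos h]
      by_cases hc : pvPairLt (l.getD ((lo + hi) / 2) (0, 0)) key = true
      · rw [if_pos hc]
        have hmb : (lo + hi) / 2 < b := by
          by_contra hge
          have hge' : b ≤ (lo + hi) / 2 := by omega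
          rw [hout _ hge' (by omega)] at hc
          simp at hc
        exact ih (hi - ((lo + hi) / 2 + 1)) (by omega) _ _ rfl (by omega) hbhi hhil
      · rw [if_neg hc]
        have hbm : b ≤ (lo + hi) / 2 := by
          by_contra hlt
          exact hc (hins _ (by omega))
        exact ih ((lo + hi) / 2 - lo) (by omega) _ _ rfl hlob hbm (by omega)
    · rw [dif_neg h]; omega

-- ---- counting in a sorted list ----
lemma sorted_count_iff (P : Int × Int → Bool)
    (hmono : ∀ a b, lexLt a b → P b = true → P a = true) :
    ∀ (l : List (Int × Int)), l.Pairwise lexLt →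
    ∀ j (hj : j < l.length), (P l[j] = true ↔ j < l.countP P) := by
  intro l
  induction l with
  | nil => intro _ j hj; simp at hj
  | cons a t ih =>
    intro hs j hj
    rw [List.pairwise_cons] at hs
    obtain ⟨ha, ht⟩ := hs
    have hcount0 : P a = false → t.countP P = 0 := by
      intro hpa
      rw [List.countP_eq_zero]
      intro x hx hPx
      rw [hmono a x (ha x hx) hPx] at hpa
      exact absurd hpa (by simp)
    cases j with
    | zero =>
      simp only [List.getElem_cons_zero, List.countP_cons]
      by_cases hpa : P a = true
      · simp [hpa]
      · have hf : P a = false := by revert hpa; cases (P a) <;> simp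
        rw [hcount0 hf, hf]
        simp
    | succ m =>
      have hm : m < t.length := by simpa using hj
      simp only [List.getElem_cons_succ, List.countP_cons]
      by_cases hpa : P a = true
      · rw [ih ht m hm, hpa]
        simp only [if_true]
        omega
      · have hf : P a = false := by revert hpa; cases (P a) <;> simp
        have htm : P t[m] = false := by
          by_contra hT
          have : P t[m] = true := by revert hT; cases (P t[m]) <;> simp
          rw [hmono a t[m] (ha t[m] (t.getElem_mem hm)) this] at hf
          exact absurd hf (by simp)
        rw [htm, hf, hcount0 hf]
        simp

lemma pvBisectLeft_eq_countP (l : List (Int × Int)) (key : Int × Int)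
    (hs : l.Pairwise lexLt) :
    pvBisectLeft l key = l.countP (fun e => pvPairLt e key) := by
  have hmono : ∀ a b, lexLt a b → pvPairLt b key = true → pvPairLt a key = true := by
    intro a b hab hb
    rw [pvPairLt_iff] at *
    exact lexLt_trans hab hb
  have hiff := sorted_count_iff (fun e => pvPairLt e key) hmono l hs
  have hble : l.countP (fun e => pvPairLt e key) ≤ l.length := List.countP_le_length
  apply pvBisectAux_eq l key _ ?hins ?hout (l.length - 0) 0 l.length rfl (by omega) hble le_rfl
  case hins =>
    intro j hjb
    have hj : j < l.length := by omega
    rw [List.getD_eq_getElem?_getD, List.getElem?_eq_getElem hj, Option.getD_some]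
    exact (hiff j hj).mpr hjb
  case hout =>
    intro j hjb hj
    rw [List.getD_eq_getElem?_getD, List.getElem?_eq_getElem hj, Option.getD_some]
    by_contra hT
    have : pvPairLt l[j] key = true := by revert hT; cases (pvPairLt l[j] key) <;> simp
    have := (hiff j hj).mp this
    omega

lemma countP_set {α : Type} (P : α → Bool) :
    ∀ (T : List α) (n : Nat), n < T.length → ∀ (e : α),
    (T.set n e).countP P + (if P (T.getD n e) then 1 else 0)
      = T.countP P + (if P e then 1 else 0) := by
  intro T
  induction T with
  | nil => intro n h; simp at h
  | cons a t ih =>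
    intro n hn e
    cases n with
    | zero => simp [List.countP_cons]; by_cases h1 : P a <;> by_cases h2 : P e <;> simp [h1, h2]
    | succ m =>
      have hm : m < t.length := by simpa using hn
      simp only [List.set_cons_succ, List.countP_cons, List.getD_cons_succ]
      have h2 := ih m hm e
      simp only [List.getD_eq_getElem?_getD] at h2 ⊢
      by_cases h1 : P a <;> simp [h1] <;> omega

lemma maxd_append (D : List (Int × Int)) (yd : Int × Int) :
    maxd (D ++ [yd]) = if yd.2 > maxd D then yd.2 else maxd D := by
  simp [maxd, List.foldl_append]

lemma bestLe_append (D : List (Int × Int)) (yd : Int × Int) (w : Int) :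
    pvBestLe (D ++ [yd]) w
      = if yd.1 ≤ w ∧ yd.2 > pvBestLe D w then yd.2 else pvBestLe D w := by
  simp [pvBestLe, List.foldl_append]

lemma pairwise_set (T : List (Int × Int)) (hT : T.Pairwise lexLt) (p : Nat) (_hp : p < T.length)
    (e : Int × Int)
    (hlow : ∀ j (hj : j < T.length), j < p → lexLt T[j] e)
    (hhigh : ∀ j (hj : j < T.length), p < j → lexLt e T[j]) :
    (T.set p e).Pairwise lexLt := by
  rw [List.pairwise_iff_getElem] at hT ⊢
  intro a b ha hb hab
  simp only [List.length_set] at ha hb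
  rw [List.getElem_set, List.getElem_set]
  split_ifs with h1 h2 h2
  · exact absurd (h1.symm.trans h2) (by omega)
  · exact hhigh b hb (by omega)
  · exact hlow a ha (by omega)
  · exact hT a b ha hb hab

-- ---- core: patience length = DP maximum, per group ----
lemma core_aux : ∀ (Q : List (Int × Int)) (T D : List (Int × Int)),
    Q.Pairwise (fun a b => a.2 < b.2) →
    T.Pairwise lexLt →
    (∀ e ∈ T, ∀ q ∈ Q, e.2 < q.2) →
    ((T.length : Int) = maxd D) →
    (∀ w : Int, ((T.countP (fun e => decide (e.1 ≤ w)) : Int) = pvBestLe D w)) →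
    ((Q.foldl patStep T).length : Int) = maxd ((Q.map Prod.fst).foldl dstep D) := by
  intro Q
  induction Q with
  | nil =>
    intro T D _ _ _ hlen _
    simpa using hlen
  | cons q Q ih =>
    rcases q with ⟨v, i⟩
    intro T D hQ hT hsnd hlen hinv
    rw [List.pairwise_cons] at hQ
    obtain ⟨hqQ, hQ'⟩ := hQ
    simp only [List.foldl_cons, List.map_cons]
    have hmono0 : ∀ a b, lexLt a b → pvPairLt b (v, i) = true → pvPairLt a (v, i) = true := by
      intro a b hab hb
      rw [pvPairLt_iff] at hb ⊢
      exact lexLt_trans hab hb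
    have hmonov : ∀ w : Int, ∀ a b : Int × Int, lexLt a b →
        decide (b.1 ≤ w) = true → decide (a.1 ≤ w) = true := by
      intro w a b hab hb
      simp only [decide_eq_true_eq] at hb ⊢
      rcases hab with h | ⟨h, _⟩ <;> omega
    have hsndT : ∀ e ∈ T, e.2 < i := fun e he => hsnd e he (v, i) (by simp)
    have hP0Pv : ∀ e ∈ T, pvPairLt e (v, i) = decide (e.1 ≤ v) := by
      intro e he
      have h2 := hsndT e he
      rw [Bool.eq_iff_iff, pvPairLt_iff, decide_eq_true_eq]
      unfold lexLt
      omega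
    have hcount_eq : T.countP (fun e => pvPairLt e (v, i))
        = T.countP (fun e => decide (e.1 ≤ v)) :=
      List.countP_congr (by intro x hx; rw [hP0Pv x hx])
    have hb : pvBisectLeft T (v, i) = T.countP (fun e => decide (e.1 ≤ v)) := by
      rw [pvBisectLeft_eq_countP T (v, i) hT, hcount_eq]
    have hiffv := sorted_count_iff (fun e => decide (e.1 ≤ v)) (hmonov v) T hT
    have hiff0 := sorted_count_iff (fun e => pvPairLt e (v, i)) hmono0 T hT
    have hple : T.countP (fun e => decide (e.1 ≤ v)) ≤ T.length := List.countP_le_length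
    have hbestv : ((T.countP (fun e => decide (e.1 ≤ v)) : Nat) : Int) = pvBestLe D v := hinv v
    by_cases hcase : T.countP (fun e => decide (e.1 ≤ v)) < T.length
    · -- bisect found a strictly larger tail head: replace it
      set p := T.countP (fun e => decide (e.1 ≤ v)) with hpdef
      have hpat : patStep T (v, i) = T.set p (v, i) := by
        rw [patStep, hb, if_pos hcase]
      rw [hpat]
      have hlow : ∀ j (hj : j < T.length), j < p → lexLt T[j] (v, i) := by
        intro j hj hjp
        have h := (hiff0 j hj).mpr (by rw [hcount_eq]; exact hjp)
        rwa [pvPairLt_iff] at h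
      have hlowv : ∀ j (hj : j < T.length), j < p → T[j].1 ≤ v := by
        intro j hj hjp
        have := (hiffv j hj).mpr hjp
        simpa using this
      have hhigh0 : ∀ j (hj : j < T.length), p ≤ j → ¬ lexLt T[j] (v, i) := by
        intro j hj hpj hcon
        have h := (hiff0 j hj).mp (by rw [pvPairLt_iff]; exact hcon)
        rw [hcount_eq] at h
        omega
      have hhigh : ∀ j (hj : j < T.length), p < j → lexLt (v, i) T[j] := by
        intro j hj hpj
        have hnot := hhigh0 j hj (by omega)
        have hne : T[j].2 ≠ i := by
          have := hsndT T[j] (T.getElem_mem hj)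
          omega
        unfold lexLt at hnot ⊢
        simp only [not_or, not_and] at hnot
        omega
      have hTpv : ¬ (T[p].1 ≤ v) := by
        intro hc
        have := (hiffv p hcase).mp (by simpa using hc)
        omega
      have hset : (T.set p (v, i)).Pairwise lexLt :=
        pairwise_set T hT p hcase (v, i) hlow hhigh
      have hsnd' : ∀ e ∈ T.set p (v, i), ∀ q ∈ Q, e.2 < q.2 := by
        intro e he q hq
        rcases List.mem_or_eq_of_mem_set he with he' | rfl
        · exact hsnd e he' q (by simp [hq])
        · exact hqQ q hq
      have hlen' : (((T.set p (v, i)).length : Nat) : Int) = maxd (dstep D v) := by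
        rw [List.length_set, dstep, maxd_append, ← hbestv]
        rw [if_neg (by rw [← hlen]; push_cast; omega)]
        exact hlen
      have hinv' : ∀ w, (((T.set p (v, i)).countP (fun e => decide (e.1 ≤ w)) : Nat) : Int)
          = pvBestLe (dstep D v) w := by
        intro w
        have hcs := countP_set (fun e => decide (e.1 ≤ w)) T p hcase (v, i)
        rw [List.getD_eq_getElem?_getD, List.getElem?_eq_getElem hcase, Option.getD_some] at hcs
        rw [dstep, bestLe_append, ← hbestv, ← hinv w]
        by_cases hvw : v ≤ w
        · by_cases htp : T[p].1 ≤ w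
          · have hge : p < T.countP (fun e => decide (e.1 ≤ w)) :=
              (sorted_count_iff _ (hmonov w) T hT p hcase).mp (by simpa using htp)
            rw [if_neg (by push_cast; omega)]
            simp [htp, hvw] at hcs
            omega
          · have hlt : T.countP (fun e => decide (e.1 ≤ w)) ≤ p := by
              by_contra hx
              have := (sorted_count_iff _ (hmonov w) T hT p hcase).mpr (by omega)
              simp only [decide_eq_true_eq] at this
              exact htp this
            have hgep : p ≤ T.countP (fun e => decide (e.1 ≤ w)) := by
              by_contra hx
              have hjlt : T.countP (fun e => decide (e.1 ≤ w)) < p := by omega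
              have hjlen : T.countP (fun e => decide (e.1 ≤ w)) < T.length := by omega
              have h1 := hlowv _ hjlen hjlt
              have := (sorted_count_iff _ (hmonov w) T hT _ hjlen).mp
                (by simp only [decide_eq_true_eq]; omega)
              omega
            rw [if_pos ⟨hvw, by push_cast; omega⟩]
            simp [htp, hvw] at hcs
            push_cast
            omega
        · rw [if_neg (fun hcon => hvw hcon.1)]
          have htp : ¬ (T[p].1 ≤ w) := by
            intro hc
            exact hTpv (by omega)
          simp [htp, hvw] at hcs
          omega
      exact ih (T.set p (v, i)) (dstep D v) hQ' hset hsnd' hlen' hinv'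
    · -- bisect ran off the end: append
      have hpeq : T.countP (fun e => decide (e.1 ≤ v)) = T.length := by omega
      have hpat : patStep T (v, i) = T ++ [(v, i)] := by
        rw [patStep, hb, if_neg hcase]
      rw [hpat]
      have hallv : ∀ e ∈ T, e.1 ≤ v := by
        intro e he
        rw [List.mem_iff_getElem] at he
        obtain ⟨j, hj, rfl⟩ := he
        have := (hiffv j hj).mpr (by omega)
        simpa using this
      have hset : (T ++ [(v, i)]).Pairwise lexLt := by
        rw [List.pairwise_append]
        refine ⟨hT, by simp, ?_⟩
        intro a ha b hb
        simp only [List.mem_singleton] at hb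
        subst hb
        have h1 := hallv a ha
        have h2 := hsndT a ha
        unfold lexLt
        omega
      have hsnd' : ∀ e ∈ T ++ [(v, i)], ∀ q ∈ Q, e.2 < q.2 := by
        intro e he q hq
        rcases List.mem_append.mp he with he' | he'
        · exact hsnd e he' q (by simp [hq])
        · simp only [List.mem_singleton] at he'
          subst he'
          exact hqQ q hq
      have hlen' : (((T ++ [(v, i)]).length : Nat) : Int) = maxd (dstep D v) := by
        rw [dstep, maxd_append, ← hbestv]
        rw [if_pos (by rw [← hlen]; push_cast; omega)]
        simp only [List.length_append, List.length_cons, List.length_nil]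
        push_cast
        omega
      have hinv' : ∀ w, (((T ++ [(v, i)]).countP (fun e => decide (e.1 ≤ w)) : Nat) : Int)
          = pvBestLe (dstep D v) w := by
        intro w
        rw [dstep, bestLe_append, ← hbestv, ← hinv w, List.countP_append]
        by_cases hvw : v ≤ w
        · have hallw : T.countP (fun e => decide (e.1 ≤ w)) = T.length := by
            rw [List.countP_eq_length]
            intro a ha
            have := hallv a ha
            simp only [decide_eq_true_eq]
            omega
          rw [if_pos ⟨hvw, by rw [hallw, ← hpeq]; push_cast; omega⟩]
          simp only [List.countP_cons, List.countP_nil]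
          simp only [hvw, decide_true, if_true]
          push_cast
          omega
        · rw [if_neg (fun hcon => hvw hcon.1)]
          have : decide (v ≤ w) = false := by simp [hvw]
          simp [this]
      exact ih _ _ hQ' hset hsnd' hlen' hinv' 

lemma core (Q : List (Int × Int)) (hQ : Q.Pairwise (fun a b => a.2 < b.2)) :
    ((Q.foldl patStep []).length : Int) = pvDpGroup (Q.map Prod.fst) := by
  rw [pvDpGroup_eq]
  exact core_aux Q [] [] hQ (by simp) (by simp) (by simp [maxd]) (by intro w; simp [pvBestLe])

-- ---- dispatch-fold characterisation ----
lemma dfold_length {σ β : Type} (dflt : σ) (f : σ → β → σ) (K : Nat) :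
    ∀ (E : List (Nat × β)) (st : List σ), (dfold dflt f K st E).length = st.length := by
  intro E
  induction E with
  | nil => intro st; simp [dfold]
  | cons ib E ih => intro st; simp only [dfold, List.foldl_cons] at *; rw [ih]; simp

lemma dfold_getD {σ β : Type} (dflt : σ) (f : σ → β → σ) (K : Nat) (hK : 0 < K) :
    ∀ (E : List (Nat × β)) (st : List σ), st.length = K → ∀ g, g < K →
    (dfold dflt f K st E).getD g dflt
      = ((E.filter (fun ib => ib.1 % K == g)).map Prod.snd).foldl f (st.getD g dflt) := by
  intro E
  induction E with
  | nil => intro st _ g _; simp [dfold]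
  | cons ib E ih =>
    intro st hst g hg
    simp only [dfold, List.foldl_cons] at *
    rw [ih (st.set (ib.1 % K) (f (st.getD (ib.1 % K) dflt) ib.2)) (by simp [hst]) g hg]
    by_cases h : ib.1 % K = g
    · subst h
      have hlt : ib.1 % K < st.length := by rw [hst]; exact Nat.mod_lt _ hK
      simp only [List.filter_cons, beq_self_eq_true, if_pos, List.map_cons, List.foldl_cons]
      rw [List.getD_eq_getElem?_getD, List.getElem?_set_self hlt, Option.getD_some,
        List.getD_eq_getElem?_getD]
    · have : (ib.1 % K == g) = false := by simp [h]
      simp only [List.filter_cons, this, Bool.false_eq_true]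
      rw [List.getD_eq_getElem?_getD, List.getElem?_set_ne h, ← List.getD_eq_getElem?_getD]
      simp

-- ---- per-step characterisations of the two ports' loop bodies ----
lemma pvStepA_char (k : Int) (arr : List Int) (hk : 1 ≤ k) (j : Nat)
    (lis : List (List (Int × Int))) (res : Int) :
    pvStepA k arr (lis, res) (j : Int)
      = (lis.set (j % k.toNat)
           (patStep (lis.getD (j % k.toNat) []) (arr.getD j 0, (j : Int))),
         res + ((lis.getD (j % k.toNat) []).length : Int)
             - ((patStep (lis.getD (j % k.toNat) []) (arr.getD j 0, (j : Int))).length : Int)) := by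
  have hkpos : (0 : Int) < k := by omega
  have hmod : PySem.Int.mod (j : Int) k = ((j % k.toNat : Nat) : Int) := by
    rw [PySem.Int.mod_eq_emod_of_pos hkpos]
    have hk0 : k = (k.toNat : Int) := by omega
    rw [hk0]
    push_cast
    rfl
  have hget : (PySem.List.pyGet? lis (PySem.Int.mod (j : Int) k)).getD []
      = lis.getD (j % k.toNat) [] := by
    rw [hmod, PySem.List.pyGet?_natCast, List.getD_eq_getElem?_getD]
  have hgetn : (PySem.Int.mod (j : Int) k).toNat = j % k.toNat := by
    rw [hmod, Int.toNat_natCast]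
  have hai : (PySem.List.pyGet? arr (j : Int)).getD 0 = arr.getD j 0 := by
    rw [PySem.List.pyGet?_natCast, List.getD_eq_getElem?_getD]
  rw [pvStepA]
  simp only [hget, hgetn, hai, patStep]
  by_cases hx : pvBisectLeft (lis.getD (j % k.toNat) []) (arr.getD j 0, (j : Int))
      < (lis.getD (j % k.toNat) []).length
  · rw [if_pos hx, if_pos hx]
    have hls : ((lis.getD (j % k.toNat) []).set
        (pvBisectLeft (lis.getD (j % k.toNat) []) (arr.getD j 0, (j : Int)))
        (arr.getD j 0, (j : Int))).length = (lis.getD (j % k.toNat) []).length := by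
      simp
    rw [Prod.mk.injEq]
    refine ⟨rfl, ?_⟩
    rw [hls]
    ring
  · rw [if_neg hx, if_neg hx]
    rw [Prod.mk.injEq]
    refine ⟨rfl, ?_⟩
    simp only [List.length_append, List.length_cons, List.length_nil]
    push_cast
    ring

lemma pvStepB_char (k : Int) (hk : 1 ≤ k) (j : Nat) (x : Int) (gs : List (List Int)) :
    pvStepB k gs ((j : Int), x) = gs.set (j % k.toNat) (gs.getD (j % k.toNat) [] ++ [x]) := by
  have hkpos : (0 : Int) < k := by omega
  have hmod : PySem.Int.mod (j : Int) k = ((j % k.toNat : Nat) : Int) := by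
    rw [PySem.Int.mod_eq_emod_of_pos hkpos]
    have hk0 : k = (k.toNat : Int) := by omega
    rw [hk0]
    push_cast
    rfl
  rw [pvStepB]
  simp only [hmod, PySem.List.pyGet?_natCast, Int.toNat_natCast, List.getD_eq_getElem?_getD]

-- ---- A's whole loop, per residue class ----
lemma sumL_set (lis : List (List (Int × Int))) :
    ∀ (m : Nat), m < lis.length → ∀ t, sumL (lis.set m t)
      = sumL lis + (t.length : Int) - ((lis.getD m []).length : Int) := by
  induction lis with
  | nil => intro m h; simp at h
  | cons a l ih =>
    intro m hm t
    cases m with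
    | zero => simp [sumL]; ring
    | succ p =>
      have hp : p < l.length := by simpa using hm
      simp only [List.set_cons_succ, sumL, List.map_cons, List.sum_cons, List.getD_cons_succ]
      have := ih p hp t
      simp only [sumL] at this
      omega

lemma A_fold_char (k : Int) (arr : List Int) (hk : 1 ≤ k) :
    ∀ (js : List Nat) (lis : List (List (Int × Int))) (res : Int),
    lis.length = k.toNat →
    (js.foldl (fun st (j : Nat) => pvStepA k arr st (j : Int)) (lis, res))
      = (dfold [] patStep k.toNat lis (js.map (fun j => (j, (arr.getD j 0, (j : Int))))),
         res + sumL lis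
           - sumL (dfold [] patStep k.toNat lis (js.map (fun j => (j, (arr.getD j 0, (j : Int))))))) := by
  intro js
  induction js with
  | nil =>
    intro lis res _
    simp only [List.foldl_nil, List.map_nil, dfold]
    rw [Prod.mk.injEq]
    exact ⟨rfl, by ring⟩
  | cons j js ih =>
    intro lis res hlen
    have hm : j % k.toNat < lis.length := by
      rw [hlen]; exact Nat.mod_lt _ (by omega)
    simp only [List.foldl_cons, List.map_cons]
    rw [pvStepA_char k arr hk j lis res]
    rw [ih _ _ (by simp [hlen])]
    have hdstep : ∀ (E : List (Nat × (Int × Int))) (e : Int × Int),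
        dfold [] patStep k.toNat lis ((j, e) :: E)
          = dfold [] patStep k.toNat (lis.set (j % k.toNat)
              (patStep (lis.getD (j % k.toNat) []) e)) E := by
      intro E e; simp [dfold]
    rw [← hdstep]
    rw [Prod.mk.injEq]
    refine ⟨rfl, ?_⟩
    rw [sumL_set lis (j % k.toNat) hm]
    ring

-- ---- list sum over positions ----
lemma map_sum_eq_range {σ : Type} (f : σ → Int) (d : σ) :
    ∀ (l : List σ), (l.map f).sum = ((List.range l.length).map (fun g => f (l.getD g d))).sum := by
  intro l
  induction l with
  | nil => simp
  | cons a t ih =>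
    simp only [List.map_cons, List.sum_cons, List.length_cons, List.range_succ_eq_map,
      List.map_map, List.getD_cons_zero]
    rw [ih]
    simp [Function.comp_def]

lemma getD_map_const_nil {α β : Type} (L : List α) (g : Nat) :
    (L.map (fun _ => ([] : List β))).getD g [] = [] := by
  rw [List.getD_eq_getElem?_getD]
  cases h : (L.map (fun _ => ([] : List β)))[g]? with
  | none => rfl
  | some v =>
    rw [List.getElem?_map] at h
    cases hv : L[g]? with
    | none => rw [hv] at h; simp at h
    | some a => rw [hv] at h; simp at h; simp [← h]

-- ---- main equivalence for 1 ≤ k ----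
lemma main_pos (arr : List Int) (k : Int) (hk : 1 ≤ k) :
    kIncreasing arr k = kIncreasing_alt arr k := by
  have hK : 0 < k.toNat := by omega
  have hrange : ∀ m : Nat, PySem.List.pyRange 0 (m : Int) 1
      = (List.range m).map (fun (j : Nat) => (j : Int)) := by
    intro m
    rw [PySem.List.pyRange_one]
    simp
  have hlenA : ((PySem.List.pyRange 0 k 1).map (fun _ => ([] : List (Int × Int)))).length
      = k.toNat := by
    rw [List.length_map, PySem.List.length_pyRange_one]
    omega
  have hlenB : ((PySem.List.pyRange 0 k 1).map (fun _ => ([] : List Int))).length = k.toNat := by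
    rw [List.length_map, PySem.List.length_pyRange_one]
    omega
  have hA : kIncreasing arr k
      = (arr.length : Int)
        - sumL (dfold [] patStep k.toNat
            ((PySem.List.pyRange 0 k 1).map (fun _ => ([] : List (Int × Int))))
            ((List.range arr.length).map (fun j => (j, (arr.getD j 0, (j : Int)))))) := by
    rw [kIncreasing, hrange arr.length, List.foldl_map]
    rw [A_fold_char k arr hk (List.range arr.length) _ _ hlenA]
    have hsum0 : sumL ((PySem.List.pyRange 0 k 1).map (fun _ => ([] : List (Int × Int)))) = 0 := by
      simp [sumL]
    simp only [hsum0]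
    ring
  have hB : kIncreasing_alt arr k
      = (arr.length : Int)
        - ((dfold [] (fun (g : List Int) (x : Int) => g ++ [x]) k.toNat
            ((PySem.List.pyRange 0 k 1).map (fun _ => ([] : List Int)))
            ((List.range arr.length).map (fun j => (j, arr.getD j 0)))).map pvDpGroup).sum := by
    rw [kIncreasing_alt, PySem.List.enumerate_eq_map_pyRange arr 0, PySem.List.len_eq,
      hrange arr.length, List.foldl_map, List.foldl_map]
    have hfold :
        (List.range arr.length).foldl
            (fun gs (j : Nat) => pvStepB k gs ((j : Int), PySem.List.pyGetD arr (j : Int) 0))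
            ((PySem.List.pyRange 0 k 1).map (fun _ => ([] : List Int)))
          = dfold [] (fun g x => g ++ [x]) k.toNat
              ((PySem.List.pyRange 0 k 1).map (fun _ => ([] : List Int)))
              ((List.range arr.length).map (fun j => (j, arr.getD j 0))) := by
      rw [dfold, List.foldl_map]
      apply PySem.List.foldl_congr_mem
      intro acc j _
      rw [PySem.List.pyGetD_natCast]
      exact pvStepB_char k hk j (arr.getD j 0) acc
    rw [hfold, PySem.List.foldl_add]
    ring
  rw [hA, hB]
  congr 1
  rw [sumL]
  rw [map_sum_eq_range (fun t => (t.length : Int)) ([] : List (Int × Int))]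
  rw [map_sum_eq_range pvDpGroup ([] : List Int)]
  rw [dfold_length, dfold_length, hlenA, hlenB]
  apply congrArg
  apply List.map_congr_left
  intro g hg
  rw [List.mem_range] at hg
  rw [dfold_getD [] patStep k.toNat hK _ _ hlenA g hg,
    dfold_getD [] (fun g x => g ++ [x]) k.toNat hK _ _ hlenB g hg,
    getD_map_const_nil, getD_map_const_nil]
  rw [List.filter_map, List.filter_map, List.map_map, List.map_map,
    PySem.List.foldl_append_singleton_eq_self, List.nil_append]
  simp only [Function.comp_def]
  have hQ : ((List.filter (fun j => j % k.toNat == g) (List.range arr.length)).map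
      (fun j => (arr.getD j 0, (j : Int)))).Pairwise (fun a b => a.2 < b.2) := by
    exact List.Pairwise.map _ (fun a b hab => by simp only []; exact_mod_cast hab)
      (List.pairwise_lt_range.filter _)
  have hc := core _ hQ
  rw [List.map_map] at hc
  simpa [Function.comp_def] using hc

-- ===== VERDICT (by name: the statement is the Claim_ definition above) =====
theorem kIncreasing_spec : Claim_equal_kIncreasing := by
  intro arr k _hdom hpre
  unfold Spec_kIncreasing
  rcases hpre with hk | rfl
  · exact main_pos arr k hk
  · simp [kIncreasing, kIncreasing_alt, PySem.List.enumerate, pvDpGroup,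
      PySem.List.pyRange_one, List.foldl_map]
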